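-- pv_equiv track=rewrite | github.com/blackSquare225/RdD | workflow/scripts/DELecter.py | cluster_deletions
-- ===== SOURCE A (Python) =====
-- from collections import defaultdict, Counter
--
-- def cluster_deletions(deletions, tolerance=100):
--     deletions.sort(key=lambda x: (x[0], x[1], x[2]))
--     parent = list(range(len(deletions)))
--     rank = [0] * len(deletions)
--
--     def find(x):
--         if parent[x] != x:
--             parent[x] = find(parent[x])
--         return parent[x]
--
--     def union(x, y):
--         root_x = find(x)
--         root_y = find(y)
--         if root_x != root_y:
--             if rank[root_x] > rank[root_y]:
--                 parent[root_y] = root_x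
--             elif rank[root_x] < rank[root_y]:
--                 parent[root_x] = root_y
--             else:
--                 parent[root_y] = root_x
--                 rank[root_x] += 1
--
--     for i in range(len(deletions)):
--         for j in range(i + 1, len(deletions)):
--             if deletions[i][0] != deletions[j][0]:
--                 break
--             if abs(deletions[i][1] - deletions[j][1]) <= tolerance and abs(deletions[i][2] - deletions[j][2]) <= tolerance:
--                 union(i, j)
--
--     clusters = defaultdict(list)
--     for i in range(len(deletions)):
--         root = find(i)
--         clusters[root].append(deletions[i])
--
--     return list(clusters.values())
-- ===== SOURCE B (Python) =====
-- def cluster_deletions(deletions, tolerance=100):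
--     deletions.sort(key=lambda x: (x[0], x[1], x[2]))
--     n = len(deletions)
--     labels = list(range(n))
--     for i in range(n):
--         for j in range(i + 1, n):
--             if deletions[i][0] != deletions[j][0]:
--                 break
--             if abs(deletions[i][1] - deletions[j][1]) <= tolerance and abs(deletions[i][2] - deletions[j][2]) <= tolerance:
--                 a, b = labels[i], labels[j]
--                 if a != b:
--                     lo, hi = (a, b) if a < b else (b, a)
--                     labels = [lo if l == hi else l for l in labels]
--     return [[deletions[j] for j in range(n) if labels[j] == i]
--             for i in range(n) if labels[i] == i]
-- ===== Notes on version B (the rewrite author's own statement) =====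
-- stated objective: simpler
-- what changed: Union-find (recursive find with path compression plus union by rank) is replaced by a flat label array merged by relabelling every member of the absorbed class to the smaller label (so each cluster is labelled by its smallest member index), and the defaultdict grouping pass is replaced by a direct comprehension over self-labelled indices; the in-place sort and the pairwise edge rule are unchanged.
import Mathlib
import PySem

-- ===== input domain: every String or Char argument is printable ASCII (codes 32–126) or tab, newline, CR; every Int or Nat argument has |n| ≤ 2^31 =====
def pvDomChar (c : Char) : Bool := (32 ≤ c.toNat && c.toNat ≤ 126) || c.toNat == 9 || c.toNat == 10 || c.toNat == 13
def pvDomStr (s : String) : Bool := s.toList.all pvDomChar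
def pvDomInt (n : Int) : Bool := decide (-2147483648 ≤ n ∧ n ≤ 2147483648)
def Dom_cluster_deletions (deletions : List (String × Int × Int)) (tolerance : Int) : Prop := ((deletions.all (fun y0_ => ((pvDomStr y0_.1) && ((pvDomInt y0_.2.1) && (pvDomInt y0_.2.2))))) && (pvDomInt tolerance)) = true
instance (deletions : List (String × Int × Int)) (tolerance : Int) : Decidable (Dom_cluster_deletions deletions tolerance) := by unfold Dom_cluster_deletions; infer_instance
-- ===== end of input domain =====

-- B replaces union-find + defaultdict grouping by a min-label relabelling array and a
-- comprehension (objective: simpler).  Both A and B sort the `deletions` argument in place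
-- in Python; the equivalence proved here is about the RETURN value (B performs the same
-- in-place sort as A).

-- ===== PORT A =====
-- parent / rank lists are modelled as functions Nat → Nat (Python indexes them only below n).
-- Python's recursive `find` with path compression; the fuel argument (always called with
-- ds.length + 1, which is proven sufficient under the union-by-rank invariant) only makes
-- the same computation total.
def pvFindA : (Nat → Nat) → Nat → Nat → (Nat → Nat) × Nat
  | p, x, 0 => (p, x)
  | p, x, fuel+1 =>
    if p x = x then (p, x)
    else
      let pr := pvFindA p (p x) fuel
      (Function.update pr.1 x pr.2, pr.2)

def pvUnionA (n : Nat) (st : (Nat → Nat) × (Nat → Nat)) (x y : Nat) : (Nat → Nat) × (Nat → Nat) :=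
  let f1 := pvFindA st.1 x (n+1)
  let rx := f1.2
  let f2 := pvFindA f1.1 y (n+1)
  let ry := f2.2
  let rk := st.2
  if rx ≠ ry then
    if rk rx > rk ry then (Function.update f2.1 ry rx, rk)
    else if rk rx < rk ry then (Function.update f2.1 rx ry, rk)
    else (Function.update f2.1 ry rx, Function.update rk rx (rk rx + 1))
  else (f2.1, rk)

-- the inner `for j in range(i+1, n)` loop with its `break`; fuel counts remaining iterations
def pvInnerA (ds : List (String × Int × Int)) (tol : Int) (i : Nat) :
    Nat → Nat → (Nat → Nat) × (Nat → Nat) → (Nat → Nat) × (Nat → Nat)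
  | 0, _, st => st
  | fuel+1, j, st =>
    if j < ds.length then
      let di := ds.getD i ("", 0, 0)
      let dj := ds.getD j ("", 0, 0)
      if di.1 ≠ dj.1 then st
      else
        let st' := if |di.2.1 - dj.2.1| ≤ tol ∧ |di.2.2 - dj.2.2| ≤ tol then
            pvUnionA ds.length st i j
          else st
        pvInnerA ds tol i fuel (j+1) st'
    else st

def pvOuterA (ds : List (String × Int × Int)) (tol : Int) :
    Nat → Nat → (Nat → Nat) × (Nat → Nat) → (Nat → Nat) × (Nat → Nat)
  | 0, _, st => st
  | fuel+1, i, st =>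
    if i < ds.length then
      pvOuterA ds tol fuel (i+1) (pvInnerA ds tol i ds.length (i+1) st)
    else st

-- `clusters = defaultdict(list); for i in range(n): clusters[find(i)].append(deletions[i])`
def pvGroupA (ds : List (String × Int × Int)) :
    Nat → Nat → (Nat → Nat) → PySem.Dict Nat (List (String × Int × Int)) →
    PySem.Dict Nat (List (String × Int × Int))
  | 0, _, _, d => d
  | fuel+1, i, p, d =>
    let f := pvFindA p i (ds.length + 1)
    let d' := d.modify f.2 [] (fun v => v ++ [ds.getD i ("", 0, 0)])
    pvGroupA ds fuel (i+1) f.1 d'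

def pvMainA (ds : List (String × Int × Int)) (tol : Int) : List (List (String × Int × Int)) :=
  let st := pvOuterA ds tol ds.length 0 ((fun x => x), (fun _ => 0))
  (pvGroupA ds ds.length 0 st.1 PySem.Dict.empty).values

def cluster_deletions (deletions : List (String × Int × Int)) (tolerance : Int) :
    List (List (String × Int × Int)) :=
  pvMainA (PySem.List.sorted deletions (fun x => toLex (x.1, toLex (x.2.1, x.2.2))) false) tolerance

-- ===== PORT B =====
def pvInnerB (ds : List (String × Int × Int)) (tol : Int) (i : Nat) :
    Nat → Nat → List Nat → List Nat
  | 0, _, L => L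
  | fuel+1, j, L =>
    if j < ds.length then
      let di := ds.getD i ("", 0, 0)
      let dj := ds.getD j ("", 0, 0)
      if di.1 ≠ dj.1 then L
      else
        let L' := if |di.2.1 - dj.2.1| ≤ tol ∧ |di.2.2 - dj.2.2| ≤ tol then
            let a := L.getD i 0
            let b := L.getD j 0
            if a ≠ b then
              let lo := if a < b then a else b
              let hi := if a < b then b else a
              L.map (fun l => if l = hi then lo else l)
            else L
          else L
        pvInnerB ds tol i fuel (j+1) L'
    else L

def pvOuterB (ds : List (String × Int × Int)) (tol : Int) :
    Nat → Nat → List Nat → List Nat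
  | 0, _, L => L
  | fuel+1, i, L =>
    if i < ds.length then
      pvOuterB ds tol fuel (i+1) (pvInnerB ds tol i ds.length (i+1) L)
    else L

def pvMainB (ds : List (String × Int × Int)) (tol : Int) : List (List (String × Int × Int)) :=
  let L := pvOuterB ds tol ds.length 0 (List.range ds.length)
  ((List.range ds.length).filter (fun i => L.getD i 0 == i)).map
    (fun i => ((List.range ds.length).filter (fun j => L.getD j 0 == i)).map
      (fun j => ds.getD j ("", 0, 0)))

def cluster_deletions_alt (deletions : List (String × Int × Int)) (tolerance : Int) :
    List (List (String × Int × Int)) :=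
  pvMainB (PySem.List.sorted deletions (fun x => toLex (x.1, toLex (x.2.1, x.2.2))) false) tolerance

-- ===== PRECONDITION & SPEC =====
def Spec_cluster_deletions (deletions : List (String × Int × Int)) (tolerance : Int) (out : List (List (String × Int × Int))) : Prop := out = cluster_deletions_alt deletions tolerance
instance (deletions : List (String × Int × Int)) (tolerance : Int) (out : List (List (String × Int × Int))) : Decidable (Spec_cluster_deletions deletions tolerance out) := by unfold Spec_cluster_deletions; infer_instance

-- ===== CLAIM (what is proved, stated in full; the proofs are below) =====
def Claim_equal_cluster_deletions : Prop := ∀ (deletions : List (String × Int × Int)) (tolerance : Int), Dom_cluster_deletions deletions tolerance → Spec_cluster_deletions deletions tolerance (cluster_deletions deletions tolerance)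

-- ===== LEMMAS AND PROOFS =====

-- ---- generic union-find verification ----

def pvWF (p r : Nat → Nat) (n : Nat) : Prop :=
  (∀ x, n ≤ x → p x = x) ∧ (∀ x, x < n → p x < n) ∧ (∀ x, p x ≠ x → r x < r (p x))

-- termination measure: number of nodes of strictly larger rank
def pvMu (r : Nat → Nat) (n x : Nat) : Nat :=
  ((Finset.range n).filter (fun y => r x < r y)).card

def pvRootF (p : Nat → Nat) : Nat → Nat → Nat
  | x, 0 => x
  | x, fuel+1 => if p x = x then x else pvRootF p (p x) fuel

def pvRoot (n : Nat) (p : Nat → Nat) (x : Nat) : Nat := pvRootF p x (n+1)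

lemma pvMu_le (r : Nat → Nat) (n x : Nat) : pvMu r n x ≤ n := by
  unfold pvMu
  exact le_trans (Finset.card_filter_le _ _) (le_of_eq (Finset.card_range n))

lemma pvMu_lt {r : Nat → Nat} {n y z : Nat} (hz : z < n) (h : r y < r z) :
    pvMu r n z < pvMu r n y := by
  unfold pvMu
  apply Finset.card_lt_card
  have hsub : (Finset.range n).filter (fun a => r z < r a) ⊆
      (Finset.range n).filter (fun a => r y < r a) := by
    intro a ha
    rcases Finset.mem_filter.mp ha with ⟨h1, h2⟩
    exact Finset.mem_filter.mpr ⟨h1, lt_trans h h2⟩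
  refine (Finset.ssubset_iff_of_subset hsub).mpr ⟨z, ?_, ?_⟩
  · exact Finset.mem_filter.mpr ⟨Finset.mem_range.mpr hz, h⟩
  · intro hmem
    exact absurd (Finset.mem_filter.mp hmem).2 (lt_irrefl _)

lemma pvWF_lt_of_ne {p r : Nat → Nat} {n : Nat} (hw : pvWF p r n) {x : Nat}
    (h : p x ≠ x) : x < n := by
  by_contra hx
  exact h (hw.1 x (le_of_not_gt hx))

lemma pvMu_step {p r : Nat → Nat} {n : Nat} (hw : pvWF p r n) {x : Nat}
    (h : p x ≠ x) : pvMu r n (p x) < pvMu r n x :=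
  pvMu_lt (hw.2.1 x (pvWF_lt_of_ne hw h)) (hw.2.2 x h)

lemma pvRootF_stable {p r : Nat → Nat} {n : Nat} (hw : pvWF p r n) :
    ∀ f g x, pvMu r n x < f → pvMu r n x < g → pvRootF p x f = pvRootF p x g := by
  intro f
  induction f with
  | zero => intro g x hf _; exact absurd hf (Nat.not_lt_zero _)
  | succ f ih =>
    intro g x hf hg
    cases g with
    | zero => exact absurd hg (Nat.not_lt_zero _)
    | succ g =>
      by_cases hpx : p x = x
      · simp [pvRootF, hpx]
      · have hμ := pvMu_step hw hpx
        simp only [pvRootF, if_neg hpx]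
        exact ih g (p x) (by omega) (by omega)

lemma pvRoot_eq_rootF {p r : Nat → Nat} {n : Nat} (hw : pvWF p r n) {f x : Nat}
    (h : pvMu r n x < f) : pvRoot n p x = pvRootF p x f :=
  pvRootF_stable hw (n+1) f x (lt_of_le_of_lt (pvMu_le r n x) (Nat.lt_succ_self n)) h

lemma pvRoot_of_fix {p : Nat → Nat} {n x : Nat} (h : p x = x) : pvRoot n p x = x := by
  simp [pvRoot, pvRootF, h]

lemma pvRoot_step {p r : Nat → Nat} {n : Nat} (hw : pvWF p r n) (x : Nat) :
    pvRoot n p (p x) = pvRoot n p x := by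
  by_cases hpx : p x = x
  · rw [hpx]
  · have hμ := pvMu_step hw hpx
    have h1 : pvRoot n p x = pvRootF p (p x) n := by
      simp only [pvRoot, pvRootF, if_neg hpx]
    rw [h1]
    exact pvRoot_eq_rootF hw (lt_of_lt_of_le hμ (pvMu_le r n x))

lemma pvRoot_fix {p r : Nat → Nat} {n : Nat} (hw : pvWF p r n) (x : Nat) :
    p (pvRoot n p x) = pvRoot n p x := by
  have aux : ∀ f x, pvMu r n x < f → p (pvRootF p x f) = pvRootF p x f := by
    intro f
    induction f with
    | zero => intro x hf; exact absurd hf (Nat.not_lt_zero _)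
    | succ f ih =>
      intro x hf
      by_cases hpx : p x = x
      · simp [pvRootF, hpx]
      · have hμ := pvMu_step hw hpx
        simp only [pvRootF, if_neg hpx]
        exact ih (p x) (by omega)
  exact aux (n+1) x (lt_of_le_of_lt (pvMu_le r n x) (Nat.lt_succ_self n))

lemma pvRoot_root {p r : Nat → Nat} {n : Nat} (hw : pvWF p r n) (x : Nat) :
    pvRoot n p (pvRoot n p x) = pvRoot n p x :=
  pvRoot_of_fix (pvRoot_fix hw x)

lemma pvRank_le_root {p r : Nat → Nat} {n : Nat} (hw : pvWF p r n) (x : Nat) :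
    r x ≤ r (pvRoot n p x) := by
  have aux : ∀ f x, pvMu r n x < f → r x ≤ r (pvRootF p x f) := by
    intro f
    induction f with
    | zero => intro x hf; exact absurd hf (Nat.not_lt_zero _)
    | succ f ih =>
      intro x hf
      by_cases hpx : p x = x
      · simp [pvRootF, hpx]
      · have hμ := pvMu_step hw hpx
        simp only [pvRootF, if_neg hpx]
        exact le_trans (le_of_lt (hw.2.2 x hpx)) (ih (p x) (by omega))
  exact aux (n+1) x (lt_of_le_of_lt (pvMu_le r n x) (Nat.lt_succ_self n))

lemma pvRank_lt_root {p r : Nat → Nat} {n : Nat} (hw : pvWF p r n) {x : Nat}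
    (h : p x ≠ x) : r x < r (pvRoot n p x) := by
  have h1 : r x < r (p x) := hw.2.2 x h
  have h2 : r (p x) ≤ r (pvRoot n p (p x)) := pvRank_le_root hw (p x)
  rw [pvRoot_step hw x] at h2
  omega

lemma pvRoot_ne_imp {p r : Nat → Nat} {n : Nat} (hw : pvWF p r n) {x : Nat}
    (h : p x ≠ x) : pvRoot n p x ≠ x := by
  intro he
  have := pvRank_lt_root hw h
  rw [he] at this
  omega

lemma pvRoot_eq_self_iff {p r : Nat → Nat} {n : Nat} (hw : pvWF p r n) {x : Nat} :
    pvRoot n p x = x ↔ p x = x := by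
  constructor
  · intro h
    by_contra hp
    exact pvRoot_ne_imp hw hp h
  · exact pvRoot_of_fix

lemma pvRoot_lt {p r : Nat → Nat} {n : Nat} (hw : pvWF p r n) {x : Nat}
    (hx : x < n) : pvRoot n p x < n := by
  have aux : ∀ f x, pvMu r n x < f → x < n → pvRootF p x f < n := by
    intro f
    induction f with
    | zero => intro x hf _; exact absurd hf (Nat.not_lt_zero _)
    | succ f ih =>
      intro x hf hx
      by_cases hpx : p x = x
      · simpa [pvRootF, hpx] using hx
      · have hμ := pvMu_step hw hpx
        simp only [pvRootF, if_neg hpx]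
        exact ih (p x) (by omega) (hw.2.1 x hx)
  exact aux (n+1) x (lt_of_le_of_lt (pvMu_le r n x) (Nat.lt_succ_self n)) hx

lemma pvRootF_congr {p q : Nat → Nat} (h : ∀ z, p z = q z) :
    ∀ f x, pvRootF p x f = pvRootF q x f := by
  intro f
  induction f with
  | zero => intro x; rfl
  | succ f ih =>
    intro x
    simp only [pvRootF, h x]
    by_cases hq : q x = x
    · simp [hq]
    · simp only [if_neg hq]
      exact ih (q x)

-- linking one root under another (the `union` write), generic over the new rank function
lemma pvLink {n : Nat} {p r : Nat → Nat} (hw : pvWF p r n) {a c : Nat}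
    (ha : p a = a) (hc : p c = c) (hac : a ≠ c) (han : a < n) (hcn : c < n)
    (r' : Nat → Nat) (hmono : ∀ z, r z ≤ r' z) (hpres : ∀ z, z ≠ c → r' z = r z)
    (hrank : r a < r' c) :
    pvWF (Function.update p a c) r' n ∧
    (∀ y, pvRoot n (Function.update p a c) y =
      (if pvRoot n p y = a then c else pvRoot n p y)) := by
  have hupd : ∀ z, Function.update p a c z = if z = a then c else p z := by
    intro z; simp [Function.update_apply]
  have hw' : pvWF (Function.update p a c) r' n := by
    refine ⟨?_, ?_, ?_⟩
    · intro x hx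
      rw [hupd x, if_neg (by omega : ¬ x = a)]
      exact hw.1 x hx
    · intro x hx
      rw [hupd x]
      by_cases hxa : x = a
      · simpa [hxa] using hcn
      · rw [if_neg hxa]; exact hw.2.1 x hx
    · intro x hx
      rw [hupd x] at hx ⊢
      by_cases hxa : x = a
      · rw [if_pos hxa] at hx ⊢
        have hr1 : r' x = r x := hpres x (by rw [hxa]; exact hac)
        have hr2 : r x = r a := by rw [hxa]
        omega
      · rw [if_neg hxa] at hx ⊢
        have hxc : x ≠ c := by
          intro he
          rw [he] at hx
          exact hx hc
        have h1 : r' x = r x := hpres x hxc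
        have h2 : r x < r (p x) := hw.2.2 x hx
        have h3 : r (p x) ≤ r' (p x) := hmono (p x)
        omega
  refine ⟨hw', ?_⟩
  have aux : ∀ f y, pvMu r' n y < f →
      pvRootF (Function.update p a c) y f = (if pvRoot n p y = a then c else pvRoot n p y) := by
    intro f
    induction f with
    | zero => intro y hf; exact absurd hf (Nat.not_lt_zero _)
    | succ f ih =>
      intro y hf
      by_cases hy : Function.update p a c y = y
      · have hya : y ≠ a := by
          intro he
          rw [he, hupd a, if_pos rfl] at hy
          exact hac hy.symm
        have hpy : p y = y := by
          rw [hupd y, if_neg hya] at hy; exact hy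
        have hl : pvRootF (Function.update p a c) y (f+1) = y := by
          simp only [pvRootF]
          rw [if_pos hy]
        rw [hl, pvRoot_of_fix hpy, if_neg hya]
      · have hμ : pvMu r' n (Function.update p a c y) < pvMu r' n y :=
          pvMu_lt (hw'.2.1 y (pvWF_lt_of_ne hw' hy)) (hw'.2.2 y hy)
        simp only [pvRootF, if_neg hy]
        rw [ih (Function.update p a c y) (by omega)]
        by_cases hya : y = a
        · have h1 : Function.update p a c y = c := by
            rw [hupd y, if_pos hya]
          rw [h1, pvRoot_of_fix hc, hya, pvRoot_of_fix ha, if_pos rfl,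
            if_neg (Ne.symm hac)]
        · have h1 : Function.update p a c y = p y := by
            rw [hupd y, if_neg hya]
          rw [h1, pvRoot_step hw y]
  intro y
  exact aux (n+1) y (lt_of_le_of_lt (pvMu_le r' n y) (Nat.lt_succ_self n))

-- path compression preserves roots and the invariant
lemma pvCompress {n : Nat} {p r : Nat → Nat} (hw : pvWF p r n) (x : Nat) :
    pvWF (Function.update p x (pvRoot n p x)) r n ∧
    (∀ y, pvRoot n (Function.update p x (pvRoot n p x)) y = pvRoot n p y) := by
  by_cases hpx : p x = x
  · have heq : ∀ z, Function.update p x (pvRoot n p x) z = p z := by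
      intro z
      rw [pvRoot_of_fix hpx, Function.update_apply]
      by_cases hz : z = x
      · rw [if_pos hz, hz]; exact hpx.symm
      · rw [if_neg hz]
    constructor
    · refine ⟨?_, ?_, ?_⟩
      · intro z hz; rw [heq z]; exact hw.1 z hz
      · intro z hz; rw [heq z]; exact hw.2.1 z hz
      · intro z hz; rw [heq z] at hz ⊢; exact hw.2.2 z hz
    · intro y
      exact pvRootF_congr heq (n+1) y
  · have hxn : x < n := pvWF_lt_of_ne hw hpx
    have hcfix : p (pvRoot n p x) = pvRoot n p x := pvRoot_fix hw x
    have hcx : pvRoot n p x ≠ x := pvRoot_ne_imp hw hpx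
    have hcn : pvRoot n p x < n := pvRoot_lt hw hxn
    have hrlt : r x < r (pvRoot n p x) := pvRank_lt_root hw hpx
    have hupd : ∀ z, Function.update p x (pvRoot n p x) z =
        if z = x then pvRoot n p x else p z := by
      intro z; simp [Function.update_apply]
    have hw' : pvWF (Function.update p x (pvRoot n p x)) r n := by
      refine ⟨?_, ?_, ?_⟩
      · intro z hz
        rw [hupd z, if_neg (by omega : ¬ z = x)]
        exact hw.1 z hz
      · intro z hz
        rw [hupd z]
        by_cases hzx : z = x
        · simpa [hzx] using hcn
        · rw [if_neg hzx]; exact hw.2.1 z hz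
      · intro z hz
        rw [hupd z] at hz ⊢
        by_cases hzx : z = x
        · rw [if_pos hzx] at hz ⊢
          have : r z = r x := by rw [hzx]
          omega
        · rw [if_neg hzx] at hz ⊢; exact hw.2.2 z hz
    refine ⟨hw', ?_⟩
    have aux : ∀ f y, pvMu r n y < f →
        pvRootF (Function.update p x (pvRoot n p x)) y f = pvRoot n p y := by
      intro f
      induction f with
      | zero => intro y hf; exact absurd hf (Nat.not_lt_zero _)
      | succ f ih =>
        intro y hf
        by_cases hy : Function.update p x (pvRoot n p x) y = y
        · have hyx : y ≠ x := by
            intro he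
            rw [he, hupd x, if_pos rfl] at hy
            exact hcx hy
          have hpy : p y = y := by
            rw [hupd y, if_neg hyx] at hy; exact hy
          have hl : pvRootF (Function.update p x (pvRoot n p x)) y (f+1) = y := by
            simp only [pvRootF]
            rw [if_pos hy]
          rw [hl, pvRoot_of_fix hpy]
        · have hμ : pvMu r n (Function.update p x (pvRoot n p x) y) < pvMu r n y :=
            pvMu_lt (hw'.2.1 y (pvWF_lt_of_ne hw' hy)) (hw'.2.2 y hy)
          simp only [pvRootF, if_neg hy]
          rw [ih (Function.update p x (pvRoot n p x) y) (by omega)]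
          by_cases hyx : y = x
          · have h1 : Function.update p x (pvRoot n p x) y = pvRoot n p x := by
              rw [hupd y, if_pos hyx]
            rw [h1, pvRoot_root hw x, hyx]
          · have h1 : Function.update p x (pvRoot n p x) y = p y := by
              rw [hupd y, if_neg hyx]
            rw [h1, pvRoot_step hw y]
    intro y
    exact aux (n+1) y (lt_of_le_of_lt (pvMu_le r n y) (Nat.lt_succ_self n))

lemma pvFindA_ok {n : Nat} {r : Nat → Nat} :
    ∀ (f : Nat) (p : Nat → Nat) (x : Nat), pvWF p r n → pvMu r n x < f →
      (pvFindA p x f).2 = pvRoot n p x ∧ pvWF (pvFindA p x f).1 r n ∧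
      (∀ y, pvRoot n (pvFindA p x f).1 y = pvRoot n p y) := by
  intro f
  induction f with
  | zero => intro p x _ hf; exact absurd hf (Nat.not_lt_zero _)
  | succ f ih =>
    intro p x hw hf
    by_cases hpx : p x = x
    · simp only [pvFindA, if_pos hpx]
      refine ⟨(pvRoot_of_fix hpx).symm, hw, ?_⟩
      intro y
      trivial
    · have hμ := pvMu_step hw hpx
      obtain ⟨h1, h2, h3⟩ := ih p (p x) hw (by omega)
      simp only [pvFindA, if_neg hpx]
      have hr : (pvFindA p (p x) f).2 = pvRoot n (pvFindA p (p x) f).1 x := by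
        rw [h3 x, h1, pvRoot_step hw x]
      obtain ⟨hcw, hcr⟩ := pvCompress h2 x
      rw [hr]
      refine ⟨?_, hcw, ?_⟩
      · rw [← hr, h1, pvRoot_step hw x]
      · intro y
        rw [hcr y, h3 y]

-- the if-formula for roots after a link, as an equivalence of partitions
lemma pvLinkIff {R R' : Nat → Nat} {a c : Nat} (_hac : a ≠ c)
    (h : ∀ y, R' y = if R y = a then c else R y) (z w : Nat) :
    (R' z = R' w) ↔ (R z = R w ∨ ((R z = a ∨ R z = c) ∧ (R w = a ∨ R w = c))) := by
  rw [h z, h w]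
  by_cases h1 : R z = a <;> by_cases h2 : R w = a
  · simp [h1, h2]
  · rw [if_pos h1, if_neg h2]
    constructor
    · intro hcw
      exact Or.inr ⟨Or.inl h1, Or.inr hcw.symm⟩
    · rintro (hzw | ⟨_, (hwa | hwc)⟩)
      · exact absurd (hzw.symm.trans h1) h2
      · exact absurd hwa h2
      · exact hwc.symm
  · rw [if_neg h1, if_pos h2]
    constructor
    · intro hcw
      exact Or.inr ⟨Or.inr hcw, Or.inl h2⟩
    · rintro (hzw | ⟨(hza | hzc), _⟩)
      · exact absurd (hzw.trans h2) h1
      · exact absurd hza h1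
      · exact hzc
  · rw [if_neg h1, if_neg h2]
    constructor
    · exact fun h => Or.inl h
    · rintro (hzw | ⟨(hza | hzc), (hwa | hwc)⟩)
      · exact hzw
      · exact absurd hza h1
      · exact absurd hza h1
      · exact absurd hwa h2
      · exact hzc.trans hwc.symm

lemma pvUnionA_ok {n : Nat} {p r : Nat → Nat} (hw : pvWF p r n) (x y : Nat)
    (hx : x < n) (hy : y < n) :
    pvWF (pvUnionA n (p, r) x y).1 (pvUnionA n (p, r) x y).2 n ∧
    (∀ z w, pvRoot n (pvUnionA n (p, r) x y).1 z = pvRoot n (pvUnionA n (p, r) x y).1 w ↔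
      (pvRoot n p z = pvRoot n p w ∨
        ((pvRoot n p z = pvRoot n p x ∨ pvRoot n p z = pvRoot n p y) ∧
         (pvRoot n p w = pvRoot n p x ∨ pvRoot n p w = pvRoot n p y)))) := by
  have hμx : pvMu r n x < n + 1 := lt_of_le_of_lt (pvMu_le r n x) (Nat.lt_succ_self n)
  obtain ⟨ha1, ha2, ha3⟩ := pvFindA_ok (n+1) p x hw hμx
  have hμy : pvMu r n y < n + 1 := lt_of_le_of_lt (pvMu_le r n y) (Nat.lt_succ_self n)
  obtain ⟨hb1, hb2, hb3⟩ := pvFindA_ok (n+1) (pvFindA p x (n+1)).1 y ha2 hμy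
  rcases hf1 : pvFindA p x (n+1) with ⟨p1, rx⟩
  rw [hf1] at ha1 ha2 ha3 hb1 hb2 hb3
  simp only at ha1 ha2 ha3 hb1 hb2 hb3
  rcases hf2 : pvFindA p1 y (n+1) with ⟨p2, ry⟩
  rw [hf2] at hb1 hb2 hb3
  simp only at hb1 hb2 hb3
  have hry : ry = pvRoot n p y := by rw [hb1, ha3 y]
  have hroots2 : ∀ z, pvRoot n p2 z = pvRoot n p z := fun z => (hb3 z).trans (ha3 z)
  have hrxroot : p2 rx = rx := by
    have h0 : pvRoot n p2 rx = rx := by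
      rw [hroots2 rx, ha1, pvRoot_root hw x]
    exact (pvRoot_eq_self_iff hb2).mp h0
  have hryroot : p2 ry = ry := by
    have h0 : pvRoot n p2 ry = ry := by
      rw [hroots2 ry, hry, pvRoot_root hw y]
    exact (pvRoot_eq_self_iff hb2).mp h0
  have hrxn : rx < n := by rw [ha1]; exact pvRoot_lt hw hx
  have hryn : ry < n := by rw [hry]; exact pvRoot_lt hw hy
  simp only [pvUnionA, hf1, hf2]
  by_cases hne : rx = ry
  · rw [if_neg (not_not_intro hne)]
    have hxy : pvRoot n p x = pvRoot n p y := by rw [← ha1, ← hry, hne]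
    refine ⟨hb2, ?_⟩
    intro z w
    rw [hroots2 z, hroots2 w]
    constructor
    · exact fun h => Or.inl h
    · rintro (h | ⟨(hza | hzb), (hwa | hwb)⟩)
      · exact h
      · exact hza.trans hwa.symm
      · exact hza.trans (hxy.trans hwb.symm)
      · exact hzb.trans (hxy.symm.trans hwa.symm)
      · exact hzb.trans hwb.symm
  · rw [if_pos hne]
    by_cases hgt : r rx > r ry
    · rw [if_pos hgt]
      obtain ⟨hwL, hrootL⟩ := pvLink hb2 hryroot hrxroot (Ne.symm hne) hryn hrxn r
        (fun z => le_refl _) (fun z _ => rfl) hgt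
      refine ⟨hwL, ?_⟩
      intro z w
      have hform : ∀ u, pvRoot n (Function.update p2 ry rx) u =
          if pvRoot n p u = ry then rx else pvRoot n p u := by
        intro u
        rw [hrootL u, hroots2 u]
      rw [pvLinkIff (Ne.symm hne) hform z w, ha1, hry]
      tauto
    · rw [if_neg hgt]
      by_cases hlt : r rx < r ry
      · rw [if_pos hlt]
        obtain ⟨hwL, hrootL⟩ := pvLink hb2 hrxroot hryroot hne hrxn hryn r
          (fun z => le_refl _) (fun z _ => rfl) hlt
        refine ⟨hwL, ?_⟩
        intro z w
        have hform : ∀ u, pvRoot n (Function.update p2 rx ry) u =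
            if pvRoot n p u = rx then ry else pvRoot n p u := by
          intro u
          rw [hrootL u, hroots2 u]
        rw [pvLinkIff hne hform z w, ha1, hry]
        try tauto
      · rw [if_neg hlt]
        obtain ⟨hwL, hrootL⟩ := pvLink hb2 hryroot hrxroot (Ne.symm hne) hryn hrxn
          (Function.update r rx (r rx + 1))
          (fun z => by
            rw [Function.update_apply]
            by_cases hz : z = rx
            · rw [if_pos hz, hz]; omega
            · rw [if_neg hz])
          (fun z hz => by rw [Function.update_apply, if_neg hz])
          (by
            rw [Function.update_apply, if_pos rfl]
            omega)
        refine ⟨hwL, ?_⟩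
        intro z w
        have hform : ∀ u, pvRoot n (Function.update p2 ry rx) u =
            if pvRoot n p u = ry then rx else pvRoot n p u := by
          intro u
          rw [hrootL u, hroots2 u]
        rw [pvLinkIff (Ne.symm hne) hform z w, ha1, hry]
        try tauto

-- ---- the simulation invariant between A's union-find state and B's label list ----

def pvInv (ds : List (String × Int × Int)) (st : (Nat → Nat) × (Nat → Nat))
    (L : List Nat) : Prop :=
  pvWF st.1 st.2 ds.length ∧ L.length = ds.length ∧
  (∀ i, i < ds.length → L.getD i 0 ≤ i ∧ L.getD (L.getD i 0) 0 = L.getD i 0) ∧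
  (∀ i j, i < ds.length → j < ds.length →
    (pvRoot ds.length st.1 i = pvRoot ds.length st.1 j ↔ L.getD i 0 = L.getD j 0))

lemma pvGetDMap (f : Nat → Nat) (L : List Nat) (i : Nat) (h : i < L.length) :
    (L.map f).getD i 0 = f (L.getD i 0) := by
  simp [List.getD_eq_getElem?_getD, List.getElem?_map, List.getElem?_eq_getElem h]

lemma pvMergeIff {a b : Nat} (hab : a ≠ b) (u v : Nat) :
    ((if u = (if a < b then b else a) then (if a < b then a else b) else u) =
     (if v = (if a < b then b else a) then (if a < b then a else b) else v)) ↔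
    (u = v ∨ ((u = a ∨ u = b) ∧ (v = a ∨ v = b))) := by
  rcases Nat.lt_trichotomy a b with h | h | h
  · simp only [if_pos h]
    by_cases h1 : u = b <;> by_cases h2 : v = b <;> simp [h1, h2] <;> omega
  · exact absurd h hab
  · have hnb : ¬ a < b := by omega
    simp only [if_neg hnb]
    by_cases h1 : u = a <;> by_cases h2 : v = a <;> simp [h1, h2] <;> omega

lemma pvStepInv {ds : List (String × Int × Int)} {st : (Nat → Nat) × (Nat → Nat)}
    {L : List Nat} (hInv : pvInv ds st L) {i j : Nat}
    (hi : i < ds.length) (hj : j < ds.length) :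
    pvInv ds (pvUnionA ds.length st i j)
      (if L.getD i 0 ≠ L.getD j 0 then
        L.map (fun l =>
          if l = (if L.getD i 0 < L.getD j 0 then L.getD j 0 else L.getD i 0)
          then (if L.getD i 0 < L.getD j 0 then L.getD i 0 else L.getD j 0) else l)
      else L) := by
  obtain ⟨p, r⟩ := st
  obtain ⟨hw, hlen, hmin, hrel⟩ := hInv
  obtain ⟨hwU, hiffU⟩ := pvUnionA_ok hw i j hi hj
  by_cases hab : L.getD i 0 = L.getD j 0
  · rw [if_neg (not_not_intro hab)]
    have hrij : pvRoot ds.length p i = pvRoot ds.length p j := (hrel i j hi hj).mpr hab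
    refine ⟨hwU, hlen, hmin, ?_⟩
    intro z w hz hw'
    rw [hiffU z w]
    constructor
    · rintro (h | ⟨(hza | hzb), (hwa | hwb)⟩)
      · exact (hrel z w hz hw').mp h
      · exact (hrel z w hz hw').mp (hza.trans hwa.symm)
      · exact (hrel z w hz hw').mp (hza.trans (hrij.trans hwb.symm))
      · exact (hrel z w hz hw').mp (hzb.trans (hrij.symm.trans hwa.symm))
      · exact (hrel z w hz hw').mp (hzb.trans hwb.symm)
    · intro h
      exact Or.inl ((hrel z w hz hw').mpr h)
  · rw [if_pos hab]
    obtain ⟨hia, hidema⟩ := hmin i hi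
    obtain ⟨hjb, hidemb⟩ := hmin j hj
    have han : L.getD i 0 < ds.length := by omega
    have hbn : L.getD j 0 < ds.length := by omega
    refine ⟨hwU, ?_, ?_, ?_⟩
    · rw [List.length_map]; exact hlen
    · intro z hz
      have hzL : z < L.length := by omega
      obtain ⟨hzle, hzidem⟩ := hmin z hz
      rw [pvGetDMap _ L z hzL]
      constructor
      · by_cases hcase : L.getD i 0 < L.getD j 0
        · simp only [if_pos hcase]
          by_cases hu1 : L.getD z 0 = L.getD j 0
          · rw [if_pos hu1]; omega
          · rw [if_neg hu1]; exact hzle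
        · simp only [if_neg hcase]
          by_cases hu1 : L.getD z 0 = L.getD i 0
          · rw [if_pos hu1]; omega
          · rw [if_neg hu1]; exact hzle
      · by_cases hcase : L.getD i 0 < L.getD j 0
        · simp only [if_pos hcase]
          by_cases hu1 : L.getD z 0 = L.getD j 0
          · rw [if_pos hu1, pvGetDMap _ L (L.getD i 0) (by omega), hidema,
              if_neg (by omega : ¬ L.getD i 0 = L.getD j 0)]
          · rw [if_neg hu1, pvGetDMap _ L (L.getD z 0) (by omega), hzidem, if_neg hu1]
        · simp only [if_neg hcase]
          by_cases hu1 : L.getD z 0 = L.getD i 0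
          · rw [if_pos hu1, pvGetDMap _ L (L.getD j 0) (by omega), hidemb,
              if_neg (by omega : ¬ L.getD j 0 = L.getD i 0)]
          · rw [if_neg hu1, pvGetDMap _ L (L.getD z 0) (by omega), hzidem, if_neg hu1]
    · intro z w hz hw2
      rw [pvGetDMap _ L z (by omega), pvGetDMap _ L w (by omega), hiffU z w,
        hrel z w hz hw2, hrel z i hz hi, hrel z j hz hj, hrel w i hw2 hi, hrel w j hw2 hj]
      exact (pvMergeIff hab _ _).symm

lemma pvInnerEq (ds : List (String × Int × Int)) (tol : Int) {i : Nat}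
    (hi : i < ds.length) :
    ∀ (fuel j : Nat) (st : (Nat → Nat) × (Nat → Nat)) (L : List Nat), pvInv ds st L →
      pvInv ds (pvInnerA ds tol i fuel j st) (pvInnerB ds tol i fuel j L) := by
  intro fuel
  induction fuel with
  | zero => intro j st L h; simpa [pvInnerA, pvInnerB] using h
  | succ fuel ih =>
    intro j st L h
    simp only [pvInnerA, pvInnerB]
    by_cases hj : j < ds.length
    · rw [if_pos hj, if_pos hj]
      by_cases hch : (ds.getD i ("", 0, 0)).1 ≠ (ds.getD j ("", 0, 0)).1
      · rw [if_pos hch, if_pos hch]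
        exact h
      · rw [if_neg hch, if_neg hch]
        by_cases htol : |(ds.getD i ("", 0, 0)).2.1 - (ds.getD j ("", 0, 0)).2.1| ≤ tol ∧
            |(ds.getD i ("", 0, 0)).2.2 - (ds.getD j ("", 0, 0)).2.2| ≤ tol
        · rw [if_pos htol, if_pos htol]
          exact ih (j+1) _ _ (pvStepInv h hi hj)
        · rw [if_neg htol, if_neg htol]
          exact ih (j+1) _ _ h
    · rw [if_neg hj, if_neg hj]
      exact h

lemma pvOuterEq (ds : List (String × Int × Int)) (tol : Int) :
    ∀ (fuel i : Nat) (st : (Nat → Nat) × (Nat → Nat)) (L : List Nat), pvInv ds st L →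
      pvInv ds (pvOuterA ds tol fuel i st) (pvOuterB ds tol fuel i L) := by
  intro fuel
  induction fuel with
  | zero => intro i st L h; simpa [pvOuterA, pvOuterB] using h
  | succ fuel ih =>
    intro i st L h
    simp only [pvOuterA, pvOuterB]
    by_cases hi : i < ds.length
    · rw [if_pos hi, if_pos hi]
      exact ih (i+1) _ _ (pvInnerEq ds tol hi ds.length (i+1) st L h)
    · rw [if_neg hi, if_neg hi]
      exact h

-- ---- the grouping passes: both produce "classes in first-occurrence order" ----

def pvReps (k : Nat → Nat) (t : Nat) : List Nat :=
  (List.range t).filter (fun m => decide (∀ m', m' < m → k m' ≠ k m))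

def pvMem (ds : List (String × Int × Int)) (k : Nat → Nat) (t c : Nat) :
    List (String × Int × Int) :=
  ((List.range t).filter (fun m => k m == k c)).map (fun m => ds.getD m ("", 0, 0))

def pvDesc (ds : List (String × Int × Int)) (k : Nat → Nat) (t : Nat) :
    PySem.Dict Nat (List (String × Int × Int)) :=
  PySem.Dict.mk ((pvReps k t).map (fun m => (k m, pvMem ds k t m)))

lemma pvBoolExt {b1 b2 : Bool} (h : b1 = true ↔ b2 = true) : b1 = b2 := by
  cases b1 <;> cases b2 <;> simp_all

lemma pvReps_lt {k : Nat → Nat} {t m : Nat} (h : m ∈ pvReps k t) : m < t :=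
  List.mem_range.mp (List.mem_filter.mp h).1

lemma pvReps_prop {k : Nat → Nat} {t m : Nat} (h : m ∈ pvReps k t) :
    ∀ m', m' < m → k m' ≠ k m :=
  of_decide_eq_true (List.mem_filter.mp h).2

lemma pvReps_pairwise (k : Nat → Nat) (t : Nat) :
    (pvReps k t).Pairwise (fun m1 m2 => k m1 ≠ k m2) := by
  have h1 : (pvReps k t).Pairwise (· < ·) := (List.pairwise_lt_range).filter _
  exact List.Pairwise.imp_of_mem
    (fun {a b} _ hb hlt => pvReps_prop hb a hlt) h1

lemma pvReps_map_nodup (k : Nat → Nat) (t : Nat) : ((pvReps k t).map k).Nodup :=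
  List.pairwise_map.mpr (pvReps_pairwise k t)

lemma pvReps_exists (k : Nat → Nat) (t : Nat) :
    ∀ m, m < t → ∃ c ∈ pvReps k t, k c = k m := by
  intro m
  induction m using Nat.strong_induction_on with
  | _ m ih =>
    intro hm
    by_cases hrep : ∀ m', m' < m → k m' ≠ k m
    · exact ⟨m, List.mem_filter.mpr ⟨List.mem_range.mpr hm, decide_eq_true hrep⟩, rfl⟩
    · push_neg at hrep
      obtain ⟨m', hm', he⟩ := hrep
      obtain ⟨c, hc, hkc⟩ := ih m' hm' (lt_trans hm' hm)
      exact ⟨c, hc, hkc.trans he⟩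

lemma pvDesc_keys (ds : List (String × Int × Int)) (k : Nat → Nat) (t : Nat) :
    (pvDesc ds k t).keys = (pvReps k t).map k := by
  show ((pvReps k t).map (fun m => (k m, pvMem ds k t m))).map (fun p => p.1) = _
  rw [List.map_map]
  exact List.map_congr_left (fun m _ => rfl)

lemma pvDesc_getD {ds : List (String × Int × Int)} {k : Nat → Nat} {t c : Nat}
    (hc : c ∈ pvReps k t) : (pvDesc ds k t).getD (k c) [] = pvMem ds k t c := by
  apply PySem.Dict.getD_of_mem_items
  · exact List.mem_map.mpr ⟨c, hc, rfl⟩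
  · rw [pvDesc_keys]; exact pvReps_map_nodup k t

lemma pvDesc_contains_iff {ds : List (String × Int × Int)} {k : Nat → Nat}
    {t : Nat} {K : Nat} :
    (pvDesc ds k t).contains K = true ↔ ∃ c ∈ pvReps k t, k c = K := by
  rw [PySem.Dict.contains_iff_mem_keys, pvDesc_keys]
  simp [List.mem_map]

lemma pvDesc_step (ds : List (String × Int × Int)) (k : Nat → Nat) (t : Nat) :
    (pvDesc ds k t).modify (k t) [] (fun v => v ++ [ds.getD t ("", 0, 0)]) =
      pvDesc ds k (t+1) := by
  show (pvDesc ds k t).insert (k t)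
      (((pvDesc ds k t).getD (k t) []) ++ [ds.getD t ("", 0, 0)]) = pvDesc ds k (t+1)
  by_cases hrep : ∀ m', m' < t → k m' ≠ k t
  · have hnc : (pvDesc ds k t).contains (k t) = false := by
      have h0 : ¬ ((pvDesc ds k t).contains (k t) = true) := by
        rw [pvDesc_contains_iff]
        rintro ⟨c, hc, hkc⟩
        exact hrep c (pvReps_lt hc) hkc
      exact Bool.eq_false_iff.mpr h0
    rw [PySem.Dict.getD_of_not_contains _ _ hnc]
    apply PySem.Dict.ext
    rw [PySem.Dict.items_insert_of_not_contains _ _ hnc]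
    have hreps : pvReps k (t+1) = pvReps k t ++ [t] := by
      unfold pvReps
      rw [List.range_succ, List.filter_append]
      congr 1
      simp [decide_eq_true hrep]
    have hmem_old : ∀ m ∈ pvReps k t, pvMem ds k (t+1) m = pvMem ds k t m := by
      intro m hm
      unfold pvMem
      rw [List.range_succ, List.filter_append]
      have hb : (k t == k m) = false :=
        beq_eq_false_iff_ne.mpr (fun he => hrep m (pvReps_lt hm) he.symm)
      simp [hb]
    have hmem_t : pvMem ds k (t+1) t = [ds.getD t ("", 0, 0)] := by
      unfold pvMem
      rw [List.range_succ, List.filter_append]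
      have h1 : (List.range t).filter (fun m => k m == k t) = [] := by
        rw [List.filter_eq_nil_iff]
        intro m hm
        simp only [beq_iff_eq]
        exact hrep m (List.mem_range.mp hm)
      simp [h1]
    show ((pvReps k t).map (fun m => (k m, pvMem ds k t m))) ++
        [(k t, [] ++ [ds.getD t ("", 0, 0)])] =
        (pvReps k (t+1)).map (fun m => (k m, pvMem ds k (t+1) m))
    rw [hreps, List.map_append]
    congr 1
    · exact (List.map_congr_left (fun m hm => by rw [hmem_old m hm])).symm
    · simp [hmem_t]
  · push_neg at hrep
    obtain ⟨m0, hm0, hkm0⟩ := hrep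
    obtain ⟨c, hc, hkc⟩ := pvReps_exists k t m0 hm0
    have hkct : k c = k t := hkc.trans hkm0
    have hcont : (pvDesc ds k t).contains (k t) = true :=
      pvDesc_contains_iff.mpr ⟨c, hc, hkct⟩
    have hget : (pvDesc ds k t).getD (k t) [] = pvMem ds k t c := by
      rw [← hkct]; exact pvDesc_getD hc
    rw [hget]
    apply PySem.Dict.ext
    rw [PySem.Dict.items_insert_of_contains _ _ hcont]
    have hreps : pvReps k (t+1) = pvReps k t := by
      unfold pvReps
      rw [List.range_succ, List.filter_append]
      have h0 : decide (∀ m', m' < t → k m' ≠ k t) = false := by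
        simp only [decide_eq_false_iff_not]
        intro hall
        exact hall m0 hm0 hkm0
      simp [h0]
    show ((pvReps k t).map (fun m => (k m, pvMem ds k t m))).map
        (fun pr => if pr.1 == k t then (k t, pvMem ds k t c ++ [ds.getD t ("", 0, 0)]) else pr) =
        (pvReps k (t+1)).map (fun m => (k m, pvMem ds k (t+1) m))
    rw [hreps, List.map_map]
    apply List.map_congr_left
    intro m hm
    by_cases hkm : k m = k t
    · have hb : (k m == k t) = true := beq_iff_eq.mpr hkm
      simp only [Function.comp, hb, if_true]
      have hmm : pvMem ds k (t+1) m = pvMem ds k t m ++ [ds.getD t ("", 0, 0)] := by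
        unfold pvMem
        rw [List.range_succ, List.filter_append]
        have hb2 : (k t == k m) = true := beq_iff_eq.mpr hkm.symm
        simp [hb2]
      have hmc : pvMem ds k t m = pvMem ds k t c := by
        unfold pvMem
        rw [show (fun m' => k m' == k m) = (fun m' => k m' == k c) from by
          funext m'; rw [hkm, hkct]]
      rw [hmm, hmc, hkm]
    · have hb : (k m == k t) = false := beq_eq_false_iff_ne.mpr hkm
      simp only [Function.comp, hb, Bool.false_eq_true, if_false]
      have hmm : pvMem ds k (t+1) m = pvMem ds k t m := by
        unfold pvMem
        rw [List.range_succ, List.filter_append]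
        have hb2 : (k t == k m) = false :=
          beq_eq_false_iff_ne.mpr (fun he => hkm he.symm)
        simp [hb2]
      rw [hmm]

lemma pvGroupA_desc (ds : List (String × Int × Int)) (k : Nat → Nat) (r : Nat → Nat) :
    ∀ (fuel t : Nat) (p : Nat → Nat), ds.length = t + fuel → pvWF p r ds.length →
      (∀ y, pvRoot ds.length p y = k y) →
      pvGroupA ds fuel t p (pvDesc ds k t) = pvDesc ds k ds.length := by
  intro fuel
  induction fuel with
  | zero =>
    intro t p hlen _ _
    have ht : t = ds.length := by omega
    simp only [pvGroupA]
    rw [ht]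
  | succ fuel ih =>
    intro t p hlen hw hroot
    simp only [pvGroupA]
    have hμ : pvMu r ds.length t < ds.length + 1 :=
      lt_of_le_of_lt (pvMu_le r ds.length t) (Nat.lt_succ_self _)
    obtain ⟨h1, h2, h3⟩ := pvFindA_ok (ds.length + 1) p t hw hμ
    rw [h1, hroot t, pvDesc_step]
    exact ih (t+1) (pvFindA p t (ds.length + 1)).1 (by omega) h2
      (fun y => (h3 y).trans (hroot y))

-- ---- assembling the main equivalence ----

lemma pvLab_range (n i : Nat) (h : i < n) : (List.range n).getD i 0 = i := by
  simp [List.getD_eq_getElem?_getD, h]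

lemma pvMain_eq (ds : List (String × Int × Int)) (tol : Int) :
    pvMainA ds tol = pvMainB ds tol := by
  have hInv0 : pvInv ds ((fun x => x), (fun _ => 0)) (List.range ds.length) := by
    refine ⟨⟨fun x _ => rfl, fun x h => h, fun x hx => absurd rfl hx⟩, List.length_range .., ?_, ?_⟩
    · intro i hi
      rw [pvLab_range _ _ hi]
      exact ⟨le_refl i, by rw [pvLab_range _ _ hi]⟩
    · intro i j hi hj
      rw [pvRoot_of_fix rfl, pvRoot_of_fix rfl, pvLab_range _ _ hi, pvLab_range _ _ hj]
  have hInv := pvOuterEq ds tol ds.length 0 _ _ hInv0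
  obtain ⟨hw, hlen, hmin, hrel⟩ := hInv
  show (pvGroupA ds ds.length 0
      (pvOuterA ds tol ds.length 0 ((fun x => x), (fun _ => 0))).1 PySem.Dict.empty).values =
    ((List.range ds.length).filter
        (fun i => (pvOuterB ds tol ds.length 0 (List.range ds.length)).getD i 0 == i)).map
      (fun i => ((List.range ds.length).filter
          (fun j => (pvOuterB ds tol ds.length 0 (List.range ds.length)).getD j 0 == i)).map
        (fun j => ds.getD j ("", 0, 0)))
  have hA : pvGroupA ds ds.length 0
      (pvOuterA ds tol ds.length 0 ((fun x => x), (fun _ => 0))).1 PySem.Dict.empty =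
      pvDesc ds (fun y => pvRoot ds.length
        (pvOuterA ds tol ds.length 0 ((fun x => x), (fun _ => 0))).1 y) ds.length := by
    have h0 : PySem.Dict.empty = pvDesc ds (fun y => pvRoot ds.length
        (pvOuterA ds tol ds.length 0 ((fun x => x), (fun _ => 0))).1 y) 0 := by
      simp only [pvDesc, pvReps, List.range_zero, List.filter_nil, List.map_nil]
      rfl
    rw [h0]
    exact pvGroupA_desc ds _
      (pvOuterA ds tol ds.length 0 ((fun x => x), (fun _ => 0))).2
      ds.length 0 _ (by omega) hw (fun y => rfl)
  rw [hA]
  -- values of the description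
  have hval : (pvDesc ds (fun y => pvRoot ds.length
      (pvOuterA ds tol ds.length 0 ((fun x => x), (fun _ => 0))).1 y) ds.length).values =
      (pvReps (fun y => pvRoot ds.length
        (pvOuterA ds tol ds.length 0 ((fun x => x), (fun _ => 0))).1 y) ds.length).map
        (fun m => pvMem ds (fun y => pvRoot ds.length
          (pvOuterA ds tol ds.length 0 ((fun x => x), (fun _ => 0))).1 y) ds.length m) := by
    simp only [pvDesc, PySem.Dict.values, List.map_map]
    exact List.map_congr_left (fun m _ => rfl)
  rw [hval]
  -- switch from the union-find roots to the label function
  have hstep1 : pvReps (fun y => pvRoot ds.length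
      (pvOuterA ds tol ds.length 0 ((fun x => x), (fun _ => 0))).1 y) ds.length =
      pvReps (fun x => (pvOuterB ds tol ds.length 0 (List.range ds.length)).getD x 0) ds.length := by
    unfold pvReps
    apply List.filter_congr
    intro m hm
    have hmn := List.mem_range.mp hm
    apply pvBoolExt
    simp only [decide_eq_true_eq]
    constructor
    · intro h m' hm' he
      exact h m' hm' ((hrel m' m (by omega) hmn).mpr he)
    · intro h m' hm' he
      exact h m' hm' ((hrel m' m (by omega) hmn).mp he)
  have hstep2 : ∀ m ∈ pvReps (fun x =>
      (pvOuterB ds tol ds.length 0 (List.range ds.length)).getD x 0) ds.length,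
      pvMem ds (fun y => pvRoot ds.length
        (pvOuterA ds tol ds.length 0 ((fun x => x), (fun _ => 0))).1 y) ds.length m =
      pvMem ds (fun x =>
        (pvOuterB ds tol ds.length 0 (List.range ds.length)).getD x 0) ds.length m := by
    intro m hm
    have hmn : m < ds.length := pvReps_lt hm
    unfold pvMem
    congr 1
    apply List.filter_congr
    intro m' hm'
    have hm'n := List.mem_range.mp hm'
    apply pvBoolExt
    simp only [beq_iff_eq]
    exact hrel m' m hm'n hmn
  rw [hstep1, List.map_congr_left hstep2]
  -- the label function groups exactly as B's comprehension does
  have hstep3 : pvReps (fun x =>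
      (pvOuterB ds tol ds.length 0 (List.range ds.length)).getD x 0) ds.length =
      (List.range ds.length).filter
        (fun i => (pvOuterB ds tol ds.length 0 (List.range ds.length)).getD i 0 == i) := by
    unfold pvReps
    apply List.filter_congr
    intro m hm
    have hmn := List.mem_range.mp hm
    obtain ⟨hle, hidem⟩ := hmin m hmn
    apply pvBoolExt
    simp only [decide_eq_true_eq, beq_iff_eq]
    constructor
    · intro h
      by_contra hne
      have hlt : (pvOuterB ds tol ds.length 0 (List.range ds.length)).getD m 0 < m := by omega
      exact h _ hlt hidem
    · intro h m' hm' he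
      obtain ⟨hle', _⟩ := hmin m' (by omega)
      omega
  rw [hstep3]
  apply List.map_congr_left
  intro m hm
  have hmm : (pvOuterB ds tol ds.length 0 (List.range ds.length)).getD m 0 = m := by
    have := (List.mem_filter.mp hm).2
    exact beq_iff_eq.mp this
  unfold pvMem
  congr 1
  apply List.filter_congr
  intro j hj
  apply pvBoolExt
  simp only [beq_iff_eq]
  rw [hmm]

-- ===== VERDICT (by name: the statement is the Claim_ definition above) =====
theorem cluster_deletions_spec : Claim_equal_cluster_deletions := by
  unfold Claim_equal_cluster_deletions
  intro deletions tolerance _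
  unfold Spec_cluster_deletions cluster_deletions cluster_deletions_alt
  exact pvMain_eq _ _
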